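-- pv_equiv track=rewrite | github.com/lebedss/Study_Python | Homework/Lesson_3/HW5.py | neg_fib
-- ===== SOURCE A (Python) =====
-- def neg_fib(num: int):
--     a, b = 1, 1
--     list_nums = [0]
--
--     for i in range(num):
--         list_nums.append(a)
--         list_nums.insert(0, a * (-1) ** i)
--         a, b = b, b + a
--
--     return list_nums
-- ===== SOURCE B (Python) =====
-- def neg_fib(num: int):
--     right = []
--     a, b = 1, 1
--     for i in range(num):
--         right.append(a)
--         a, b = b, b + a
--     left = [v * (-1) ** i for i, v in enumerate(right)][::-1]
--     return left + [0] + right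
-- ===== Notes on version B (the rewrite author's own statement) =====
-- stated objective: alternative
-- what changed: B builds the forward Fibonacci table once with append-only growth, then derives the signed left half by an enumerate/reverse comprehension and concatenates left + [0] + right, instead of A's interleaved two-ended growth using insert(0, ...) on every iteration.
import Mathlib
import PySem

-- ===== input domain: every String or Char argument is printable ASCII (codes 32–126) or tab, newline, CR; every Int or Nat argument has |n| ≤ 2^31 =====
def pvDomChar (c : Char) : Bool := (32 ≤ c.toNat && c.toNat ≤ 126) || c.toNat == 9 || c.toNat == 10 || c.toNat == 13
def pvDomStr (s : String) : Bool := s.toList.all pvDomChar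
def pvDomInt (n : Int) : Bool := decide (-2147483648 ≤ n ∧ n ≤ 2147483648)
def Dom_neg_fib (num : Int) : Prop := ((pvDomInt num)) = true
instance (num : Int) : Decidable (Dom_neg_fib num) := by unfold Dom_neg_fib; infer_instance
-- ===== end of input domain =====

-- B replaces A's per-step insert(0, ...) two-ended growth by one append-only Fibonacci pass plus
-- a reversed signed copy for the left half, assembling left ++ [0] ++ right.

-- ===== PORT A =====
-- loop state (a, b, list_nums); insert(0, x) is cons, append is ++ [a].
-- (-1) ** i is ported as (-1 : Int) ^ i.toNat, exact since range indices satisfy 0 ≤ i.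
def neg_fib (num : Int) : List Int :=
  (((PySem.List.pyRange 0 num 1).foldl
      (fun (st : Int × Int × List Int) (i : Int) =>
        (st.2.1, st.2.1 + st.1, (st.1 * (-1) ^ i.toNat) :: (st.2.2 ++ [st.1])))
      (1, 1, [0]))).2.2

-- ===== PORT B =====
-- forward pass building `right`, then left = [v * (-1)**i for i, v in enumerate(right)][::-1]
-- ([::-1] ported as List.reverse), result left ++ [0] ++ right.
def neg_fib_alt (num : Int) : List Int :=
  let st := (PySem.List.pyRange 0 num 1).foldl
      (fun (st : Int × Int × List Int) (_i : Int) =>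
        (st.2.1, st.2.1 + st.1, st.2.2 ++ [st.1]))
      (1, 1, [])
  let right := st.2.2
  let left := ((PySem.List.enumerate right 0).map (fun p => p.2 * (-1) ^ p.1.toNat)).reverse
  left ++ [0] ++ right

-- ===== PRECONDITION & SPEC =====
def Spec_neg_fib (num : Int) (out : List Int) : Prop := out = neg_fib_alt num
instance (num : Int) (out : List Int) : Decidable (Spec_neg_fib num out) := by unfold Spec_neg_fib; infer_instance

-- ===== CLAIM (what is proved, stated in full; the proofs are below) =====
def Claim_equal_neg_fib : Prop := ∀ (num : Int), Dom_neg_fib num → Spec_neg_fib num (neg_fib num)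

-- ===== LEMMAS AND PROOFS =====

-- pure Fibonacci state after n steps
def fibP : Nat → Int × Int
  | 0 => (1, 1)
  | n + 1 => ((fibP n).2, (fibP n).2 + (fibP n).1)

def rightL (n : Nat) : List Int := (List.range n).map (fun k => (fibP k).1)

def leftL (n : Nat) : List Int :=
  ((List.range n).map (fun k => (fibP k).1 * (-1) ^ k)).reverse

lemma rightL_succ (n : Nat) : rightL (n + 1) = rightL n ++ [(fibP n).1] := by
  simp [rightL, List.range_succ]

lemma rightL_length (n : Nat) : (rightL n).length = n := by
  simp [rightL]

lemma foldA_range (n : Nat) :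
    (List.range n).foldl
      (fun (st : Int × Int × List Int) (k : Nat) =>
        (st.2.1, st.2.1 + st.1, (st.1 * (-1) ^ ((0 : Int) + (k : Int)).toNat) :: (st.2.2 ++ [st.1])))
      (1, 1, [0])
    = ((fibP n).1, (fibP n).2, leftL n ++ 0 :: rightL n) := by
  induction n with
  | zero => simp [fibP, leftL, rightL]
  | succ n ih =>
    rw [List.range_succ, List.foldl_append, ih]
    simp [fibP, rightL_succ, leftL, List.range_succ]

lemma foldB_range (n : Nat) :
    (List.range n).foldl
      (fun (st : Int × Int × List Int) (_k : Nat) =>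
        (st.2.1, st.2.1 + st.1, st.2.2 ++ [st.1]))
      (1, 1, [])
    = ((fibP n).1, (fibP n).2, rightL n) := by
  induction n with
  | zero => simp [fibP, rightL]
  | succ n ih =>
    rw [List.range_succ, List.foldl_append, ih]
    simp [fibP, rightL_succ]

lemma enum_rightL (n : Nat) :
    (PySem.List.enumerate (rightL n) 0).map (fun p => p.2 * (-1) ^ p.1.toNat)
    = (List.range n).map (fun k => (fibP k).1 * (-1) ^ k) := by
  induction n with
  | zero => simp [rightL]
  | succ n ih =>
    rw [rightL_succ, PySem.List.enumerate_append, List.map_append, ih]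
    simp [PySem.List.enumerate, rightL_length, List.range_succ]

-- ===== VERDICT (by name: the statement is the Claim_ definition above) =====
theorem neg_fib_spec : Claim_equal_neg_fib := by
  intro num _
  show neg_fib num = neg_fib_alt num
  unfold neg_fib neg_fib_alt
  rw [PySem.List.pyRange_one]
  rw [List.foldl_map, List.foldl_map]
  rw [foldA_range, foldB_range]
  simp only []
  rw [enum_rightL]
  simp [leftL]
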